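-- pv_equiv track=rewrite | github.com/juns0720/baekjoon | 백준/Gold/1036. 36진수/36진수.py | base10
-- ===== SOURCE A (Python) =====
-- def base10(s):
--     n = len(s)
--     res = 0
--     for i in range(n):
--         cur_s = s[i]
--         if s[i] in dic:
--             cur_s = dic[s[i]]
--
--         if 47 < ord(cur_s) < 58:
--             res += (int(cur_s))*36**(n-1-i)
--         else:
--             res += (ord(cur_s)-55)*36**(n-1-i)
--
--     return res
--
-- dic = {}
-- ===== SOURCE B (Python) =====
-- def base10(s):
--     res = 0
--     for c in s:
--         o = ord(c)
--         res = res * 36 + (o - 48 if 48 <= o < 58 else o - 55)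
--     return res
-- ===== Notes on version B (the rewrite author's own statement) =====
-- stated objective: faster
-- what changed: Replaces the positional sum with a recomputed power 36**(n-1-i) per character by a single Horner pass (res = res*36 + digit), eliminating the big-integer exponentiations.
import Mathlib
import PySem

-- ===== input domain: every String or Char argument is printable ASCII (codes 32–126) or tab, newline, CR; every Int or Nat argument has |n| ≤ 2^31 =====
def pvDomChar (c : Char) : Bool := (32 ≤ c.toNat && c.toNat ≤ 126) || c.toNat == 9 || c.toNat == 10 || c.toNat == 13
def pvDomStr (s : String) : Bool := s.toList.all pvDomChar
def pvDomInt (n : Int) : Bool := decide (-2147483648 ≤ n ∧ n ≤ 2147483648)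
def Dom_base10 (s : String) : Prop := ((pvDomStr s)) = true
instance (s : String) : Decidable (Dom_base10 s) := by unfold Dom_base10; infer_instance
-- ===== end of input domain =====

-- B replaces A's per-character power 36**(n-1-i) by a single Horner pass (res = res*36 + digit).

-- ===== PORT A =====
-- module-level 'dic = {}' (empty; the lookup branch never fires, but is ported faithfully)
def dicA : PySem.Dict Char Char := PySem.Dict.empty

def base10 (s : String) : Int :=
  let cs := s.toList
  let n : Int := cs.length
  (PySem.List.pyRange 0 n 1).foldl (fun res i =>
    let c := PySem.List.pyGetD cs i ' '      -- s[i]; i always in range here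
    let cur_s := match dicA.get? c with      -- 'if s[i] in dic: cur_s = dic[s[i]]'
      | some v => v
      | none => c
    let o : Int := cur_s.toNat               -- ord(cur_s)
    if 47 < o ∧ o < 58 then
      res + (o - 48) * 36 ^ (n - 1 - i).toNat   -- int(cur_s) on a digit char is ord - 48
    else
      res + (o - 55) * 36 ^ (n - 1 - i).toNat) 0

-- ===== PORT B =====
def base10_alt (s : String) : Int :=
  s.toList.foldl (fun res c =>
    let o : Int := c.toNat
    res * 36 + (if 48 ≤ o ∧ o < 58 then o - 48 else o - 55)) 0

-- ===== PRECONDITION & SPEC =====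
def Spec_base10 (s : String) (out : Int) : Prop := out = base10_alt s
instance (s : String) (out : Int) : Decidable (Spec_base10 s out) := by unfold Spec_base10; infer_instance

-- ===== CLAIM (what is proved, stated in full; the proofs are below) =====
def Claim_equal_base10 : Prop := ∀ (s : String), Dom_base10 s → Spec_base10 s (base10 s)

-- ===== LEMMAS AND PROOFS =====

/-- The digit value both loop bodies assign to a character. -/
def pvDigit (c : Char) : Int :=
  if 48 ≤ (c.toNat : Int) ∧ (c.toNat : Int) < 58 then (c.toNat : Int) - 48 else (c.toNat : Int) - 55

/-- Positional value Σ digit(cᵢ)·36^(n-1-i), defined structurally. -/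
def pvS : List Char → Int
  | [] => 0
  | c :: cs => pvDigit c * 36 ^ cs.length + pvS cs

lemma pvB_eq (cs : List Char) (a : Int) :
    cs.foldl (fun res c =>
      let o : Int := c.toNat
      res * 36 + (if 48 ≤ o ∧ o < 58 then o - 48 else o - 55)) a
    = a * 36 ^ cs.length + pvS cs := by
  induction cs generalizing a with
  | nil => simp [pvS]
  | cons c cs ih =>
    simp only [List.foldl_cons, ih, pvS, pvDigit, List.length_cons]
    ring

lemma pvSum_eq (cs : List Char) :
    ((List.range cs.length).map
      (fun k => pvDigit (cs.getD k ' ') * 36 ^ (cs.length - 1 - k))).sum = pvS cs := by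
  induction cs with
  | nil => simp [pvS]
  | cons c cs ih =>
    rw [List.length_cons, List.range_succ_eq_map, List.map_cons, List.map_map, List.sum_cons]
    have h2 : List.map ((fun k => pvDigit ((c :: cs).getD k ' ') * 36 ^ (cs.length + 1 - 1 - k))
          ∘ Nat.succ) (List.range cs.length)
        = List.map (fun k => pvDigit (cs.getD k ' ') * 36 ^ (cs.length - 1 - k))
            (List.range cs.length) := by
      apply List.map_congr_left
      intro k hk
      simp only [Function.comp_apply, List.getD_cons_succ]
      congr 2
      omega
    rw [h2, ih]
    simp [pvS]

theorem base10_spec : Claim_equal_base10 := by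
  intro s _
  show base10 s = base10_alt s
  unfold base10 base10_alt
  simp only []
  generalize s.toList = cs
  have hfun : (fun (res : Int) (i : Int) =>
      let c := PySem.List.pyGetD cs i ' '
      let cur_s := match dicA.get? c with
        | some v => v
        | none => c
      let o : Int := cur_s.toNat
      if 47 < o ∧ o < 58 then
        res + (o - 48) * 36 ^ (((cs.length : Int)) - 1 - i).toNat
      else
        res + (o - 55) * 36 ^ (((cs.length : Int)) - 1 - i).toNat)
    = fun res i => res + pvDigit (PySem.List.pyGetD cs i ' ')
        * 36 ^ (((cs.length : Int)) - 1 - i).toNat := by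
    funext res i
    simp only [dicA, PySem.Dict.get?_empty, pvDigit]
    simp only [show ((47:Int) < ((PySem.List.pyGetD cs i ' ').toNat : Int)
          ∧ ((PySem.List.pyGetD cs i ' ').toNat : Int) < 58)
        ↔ ((48:Int) ≤ ((PySem.List.pyGetD cs i ' ').toNat : Int)
          ∧ ((PySem.List.pyGetD cs i ' ').toNat : Int) < 58) from by omega]
    split_ifs with h <;> ring
  rw [hfun, PySem.List.foldl_add, PySem.List.pyRange_zero_nat, List.map_map]
  have hmap : (List.range cs.length).map
      ((fun i => pvDigit (PySem.List.pyGetD cs i ' ')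
        * 36 ^ (((cs.length : Int)) - 1 - i).toNat) ∘ (fun k : Nat => (k : Int)))
    = (List.range cs.length).map
      (fun k => pvDigit (cs.getD k ' ') * 36 ^ (cs.length - 1 - k)) := by
    apply List.map_congr_left
    intro k hk
    rw [List.mem_range] at hk
    have he : (((cs.length : Int)) - 1 - (k : Int)).toNat = cs.length - 1 - k := by omega
    simp only [Function.comp_apply, PySem.List.pyGetD_natCast, he]
  rw [hmap, pvSum_eq, pvB_eq]
  simp
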